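-- pv_equiv track=rewrite | github.com/abinit/abipy | abipy/data/runs/abiyaml.py | next_yaml_doc
-- ===== SOURCE A (Python) =====
-- def next_yaml_doc(stream, doc_tag="---"):
--     """
--     Returns the first YAML document in stream.
--
--     .. warning:
--
--         Assume that the YAML document are closed explicitely with the sentinel '...'
--     """
--     in_doc, lines = None, []
--     for i, line in enumerate(stream):
--         if line.startswith(doc_tag):
--             in_doc = True
--
--         if in_doc:
--             lines.append(line)
--
--         if in_doc and line.startswith("..."):
--             break
--
--     if lines:
--         return "".join(lines)
--     else:
--         raise StopIteration()
-- ===== SOURCE B (Python) =====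
-- def next_yaml_doc(stream, doc_tag="---"):
--     """Two-phase: first skip to the line opening the document, then collect
--     lines through the terminating '...' line."""
--     it = iter(stream)
--     for line in it:
--         if line.startswith(doc_tag):
--             break
--     else:
--         raise StopIteration()
--     lines = [line]
--     if not line.startswith("..."):
--         for line in it:
--             lines.append(line)
--             if line.startswith("..."):
--                 break
--     return "".join(lines)
-- ===== Notes on version B (the rewrite author's own statement) =====
-- stated objective: idiomatic
-- what changed: Replaced the in_doc flag driving a single loop by two explicit phases: a skip loop that advances the iterator to the first line starting with doc_tag (raising StopIteration via for-else if none), then a collect loop that appends lines through the first '...' terminator.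
import Mathlib
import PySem

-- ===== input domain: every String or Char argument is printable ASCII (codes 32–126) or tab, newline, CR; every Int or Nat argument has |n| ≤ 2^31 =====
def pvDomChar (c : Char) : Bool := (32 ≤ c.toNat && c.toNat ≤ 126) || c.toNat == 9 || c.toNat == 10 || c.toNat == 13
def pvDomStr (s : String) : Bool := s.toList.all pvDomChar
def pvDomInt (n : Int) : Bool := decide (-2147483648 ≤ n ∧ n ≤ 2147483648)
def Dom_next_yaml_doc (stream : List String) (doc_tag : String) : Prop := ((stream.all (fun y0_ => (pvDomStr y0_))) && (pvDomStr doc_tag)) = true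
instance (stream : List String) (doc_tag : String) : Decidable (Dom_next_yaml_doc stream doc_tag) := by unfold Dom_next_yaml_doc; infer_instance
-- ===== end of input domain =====

-- B replaces A's in_doc-flag loop by two explicit phases (skip to the opening tag
-- line, then collect through the '...' terminator); same cost, more idiomatic.


-- ===== PORT A =====
-- A's single loop: state (in_doc, lines), break after appending a '...' line while in_doc.
def nydGoA (doc_tag : String) : List String → Bool → List String → List String
  | [], _, acc => acc
  | l :: ls, inDoc, acc =>
    let inDoc' := inDoc || PySem.Str.startswith l doc_tag
    let acc' := if inDoc' then acc ++ [l] else acc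
    if inDoc' && PySem.Str.startswith l "..." then acc' else nydGoA doc_tag ls inDoc' acc'

def next_yaml_doc (stream : List String) (doc_tag : String) : String :=
  PySem.Str.join "" (nydGoA doc_tag stream false [])

-- ===== PORT B =====
-- phase 1: advance to the first line starting with doc_tag (none = for-else raise)
def nydSkip (doc_tag : String) : List String → Option (String × List String)
  | [] => none
  | l :: ls => if PySem.Str.startswith l doc_tag then some (l, ls) else nydSkip doc_tag ls

-- phase 2: append lines, breaking after a line starting with '...'
def nydCollect : List String → List String
  | [] => []
  | l :: ls => if PySem.Str.startswith l "..." then [l] else l :: nydCollect ls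

def next_yaml_doc_alt (stream : List String) (doc_tag : String) : String :=
  match nydSkip doc_tag stream with
  | none => ""  -- Python B raises StopIteration here; excluded by Pre_
  | some (l, rest) =>
    PySem.Str.join "" (l :: (if PySem.Str.startswith l "..." then [] else nydCollect rest))

-- ===== PRECONDITION & SPEC =====
-- Pre_ excludes exactly the inputs on which A (and B) raise StopIteration:
-- streams with no line starting with doc_tag.
def Pre_next_yaml_doc (stream : List String) (doc_tag : String) : Prop :=
  stream.any (fun l => PySem.Str.startswith l doc_tag) = true
instance (stream : List String) (doc_tag : String) : Decidable (Pre_next_yaml_doc stream doc_tag) := by unfold Pre_next_yaml_doc; infer_instance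

def pvWitness_next_yaml_doc : List String × String := (["---", "a: 1", "..."], "---")

def Spec_next_yaml_doc (stream : List String) (doc_tag : String) (out : String) : Prop := out = next_yaml_doc_alt stream doc_tag
instance (stream : List String) (doc_tag : String) (out : String) : Decidable (Spec_next_yaml_doc stream doc_tag out) := by unfold Spec_next_yaml_doc; infer_instance

-- ===== CLAIM (what is proved, stated in full; the proofs are below) =====
def Claim_equal_next_yaml_doc : Prop := ∀ (stream : List String) (doc_tag : String), Dom_next_yaml_doc stream doc_tag → Pre_next_yaml_doc stream doc_tag → Spec_next_yaml_doc stream doc_tag (next_yaml_doc stream doc_tag)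

-- ===== LEMMAS AND PROOFS =====
-- Once in_doc is true, A's loop collects exactly nydCollect of the remaining lines.
theorem nydGoA_true (doc_tag : String) (ls : List String) (acc : List String) :
    nydGoA doc_tag ls true acc = acc ++ nydCollect ls := by
  induction ls generalizing acc with
  | nil => simp [nydGoA, nydCollect]
  | cons l ls ih =>
    simp only [nydGoA, nydCollect, Bool.true_or, Bool.true_and]
    split <;> simp [ih]

-- Before in_doc becomes true, A's loop skips exactly as nydSkip does.
theorem nydGoA_eq (doc_tag : String) (ls : List String) :
    nydGoA doc_tag ls false [] =
      match nydSkip doc_tag ls with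
      | none => []
      | some (l, rest) =>
        l :: (if PySem.Str.startswith l "..." then [] else nydCollect rest) := by
  induction ls with
  | nil => simp [nydGoA, nydSkip]
  | cons l ls ih =>
    by_cases h : PySem.Str.startswith l doc_tag
    · simp only [nydGoA, nydSkip, h, Bool.false_or, if_pos, Bool.true_and]
      by_cases hb : PySem.Str.startswith l "..." <;>
        simp only [nydGoA_true, hb, if_pos, if_neg, Bool.not_eq_true, List.nil_append,
          List.singleton_append]
    · simp only [nydGoA, nydSkip, h, Bool.false_or, Bool.false_and]
      simpa using ih

-- ===== VERDICT (by name: the statement is the Claim_ definition above) =====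
theorem next_yaml_doc_spec : Claim_equal_next_yaml_doc := by
  intro stream doc_tag _ _
  unfold Spec_next_yaml_doc next_yaml_doc next_yaml_doc_alt
  rw [nydGoA_eq]
  cases h : nydSkip doc_tag stream <;> rfl
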